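-- pv_equiv track=rewrite | github.com/kmgyu/baekJoonPractice | 1000-1999/1014.py | bits_check
-- ===== SOURCE A (Python) =====
-- def bits_check(bit, fbit, width):
--     for i in range(width):
--         if (1 << i) & fbit:
--             if i > 0 and ((1 << (i-1)) & bit):
--                 return False # 왼쪽 뒤에 앉음
--             if (1 << (i+1)) & bit:
--                 return False # 오른쪽 뒤에 앉음
--     return True
-- ===== SOURCE B (Python) =====
-- def bits_check(bit, fbit, width):
--     # seats beyond the top set bit of either mask cannot create a new conflict,
--     # so the effective width can be capped before building the mask
--     w = min(width, max(bit.bit_length(), fbit.bit_length()) + 2)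
--     if w <= 0:
--         return True
--     f = fbit & ((1 << w) - 1)
--     return (bit & ((f << 1) | (f >> 1))) == 0
-- ===== Notes on version B (the rewrite author's own statement) =====
-- stated objective: faster
-- what changed: Replaced A's per-seat loop over range(width) by a single closed-form bitmask test: mask fbit to the low width bits and check bit against the union of its two shifted copies ((f<<1)|(f>>1)).
import Mathlib
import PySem

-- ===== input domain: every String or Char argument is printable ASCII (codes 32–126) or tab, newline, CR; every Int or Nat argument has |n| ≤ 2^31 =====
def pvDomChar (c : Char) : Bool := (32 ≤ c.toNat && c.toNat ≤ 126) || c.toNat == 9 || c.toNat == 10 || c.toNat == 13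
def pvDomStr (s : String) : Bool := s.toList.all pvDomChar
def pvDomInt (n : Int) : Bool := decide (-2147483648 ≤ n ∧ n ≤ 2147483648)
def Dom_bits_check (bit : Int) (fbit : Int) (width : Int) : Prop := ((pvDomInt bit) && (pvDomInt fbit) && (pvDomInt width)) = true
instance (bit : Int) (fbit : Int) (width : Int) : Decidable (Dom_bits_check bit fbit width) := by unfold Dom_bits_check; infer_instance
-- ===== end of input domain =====

-- B replaces A's per-seat loop by one closed-form bitmask test: mask fbit to the low `width`
-- bits and check that `bit` avoids both shifted copies of the mask (objective: faster, O(1) big-int ops instead of a width-long loop).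

-- ===== PORT A =====
-- literal transliteration of A's loop: iterate over range(width) with early return.
-- (Python's `1 << i` for the loop variable i ≥ 0 is ported as `1 <<< i.toNat`, exact since
-- every i drawn from range(width) is nonnegative.)
-- the loop counts the remaining iterations of `for i in range(width)` in a Nat fuel
def bitsCheckLoop (bit : Int) (fbit : Int) (i : Int) : Nat → Bool
  | 0 => true
  | n + 1 =>
    if PySem.Int.band ((1 : Int) <<< i.toNat) fbit ≠ 0 then
      if i > 0 ∧ PySem.Int.band ((1 : Int) <<< (i - 1).toNat) bit ≠ 0 then
        false
      else if PySem.Int.band ((1 : Int) <<< (i + 1).toNat) bit ≠ 0 then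
        false
      else bitsCheckLoop bit fbit (i + 1) n
    else bitsCheckLoop bit fbit (i + 1) n

def bits_check (bit : Int) (fbit : Int) (width : Int) : Bool :=
  bitsCheckLoop bit fbit 0 width.toNat

-- ===== PORT B =====
def bits_check_alt (bit : Int) (fbit : Int) (width : Int) : Bool :=
  let w := min width ((max (PySem.Int.bitLength bit) (PySem.Int.bitLength fbit) : Int) + 2)
  if w ≤ 0 then true
  else
    let f := PySem.Int.band fbit (((1 : Int) <<< w.toNat) - 1)
    decide (PySem.Int.band bit (PySem.Int.bor (f <<< (1 : Nat)) (f >>> (1 : Nat))) = 0)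

-- ===== PRECONDITION & SPEC =====
def Spec_bits_check (bit : Int) (fbit : Int) (width : Int) (out : Bool) : Prop := out = bits_check_alt bit fbit width
instance (bit : Int) (fbit : Int) (width : Int) (out : Bool) : Decidable (Spec_bits_check bit fbit width out) := by unfold Spec_bits_check; infer_instance

-- ===== CLAIM (what is proved, stated in full; the proofs are below) =====
def Claim_equal_bits_check : Prop := ∀ (bit : Int) (fbit : Int) (width : Int), Dom_bits_check bit fbit width → Spec_bits_check bit fbit width (bits_check bit fbit width)

-- ===== LEMMAS AND PROOFS =====

-- Subtracting the overlap g &&& m from g clears exactly the bits of g that m also has.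
theorem pvTb_sub_and (j : Nat) : ∀ g m : Nat, (g - (g &&& m)).testBit j = (g.testBit j && !(m.testBit j)) := by
  induction j with
  | zero =>
    intro g m
    have hle : g &&& m ≤ g := Nat.and_le_left
    have h0 : (g &&& m).testBit 0 = (g.testBit 0 && m.testBit 0) := Nat.testBit_and ..
    simp only [Nat.testBit_zero] at h0
    rw [← Bool.decide_and, decide_eq_decide] at h0
    simp only [Nat.testBit_zero, ← decide_not, ← Bool.decide_and]
    apply decide_eq_decide.mpr
    omega
  | succ j ih =>
    intro g m
    have hle : g &&& m ≤ g := Nat.and_le_left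
    have h0 : (g &&& m).testBit 0 = (g.testBit 0 && m.testBit 0) := Nat.testBit_and ..
    simp only [Nat.testBit_zero] at h0
    rw [← Bool.decide_and, decide_eq_decide] at h0
    have hd2 : (g &&& m) / 2 = g / 2 &&& m / 2 := Nat.and_div_two
    have hdiv : (g - (g &&& m)) / 2 = g / 2 - (g / 2 &&& m / 2) := by
      rw [← hd2]; omega
    rw [Nat.testBit_add_one, Nat.testBit_add_one, Nat.testBit_add_one, hdiv, ih]

-- PySem.Int.band with a Nat on the right is a Nat whose bits are the conjunction of the two bit streams.
theorem pvBand_nat (x : Int) (g : Nat) :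
    ∃ h : Nat, PySem.Int.band x (g : Int) = (h : Int) ∧ ∀ j, h.testBit j = (x.testBit j && g.testBit j) := by
  rcases x with m | m
  · refine ⟨m &&& g, ?_, ?_⟩
    · simp [PySem.Int.band]
    · intro j
      have : Int.testBit (Int.ofNat m) j = m.testBit j := rfl
      rw [this, Nat.testBit_and]
  · refine ⟨g - (g &&& m), ?_, ?_⟩
    · have h1 : ¬ (0 : Int) ≤ Int.negSucc m := by simp [Int.negSucc_eq]; omega
      simp [PySem.Int.band, h1]
    · intro j
      have : Int.testBit (Int.negSucc m) j = !(m.testBit j) := rfl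
      rw [pvTb_sub_and, this, Bool.and_comm]

theorem pvBand_eq_zero (x : Int) (g : Nat) :
    PySem.Int.band x (g : Int) = 0 ↔ ∀ j, ¬(x.testBit j = true ∧ g.testBit j = true) := by
  obtain ⟨h, he, ht⟩ := pvBand_nat x g
  rw [he]
  constructor
  · intro h0 j ⟨ha, hb⟩
    have hh : h = 0 := by exact_mod_cast h0
    have := ht j
    rw [hh, Nat.zero_testBit, ha, hb] at this
    simp at this
  · intro hall
    have hh : h = 0 := by
      apply Nat.zero_of_testBit_eq_false
      intro j
      have := hall j
      rw [ht j]
      cases hx : x.testBit j <;> cases hgj : g.testBit j <;> simp_all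
    rw [hh]; rfl

-- a power-of-two test is a single-bit test
theorem pvBand_pow (x : Int) (k : Nat) :
    (PySem.Int.band x ((2 ^ k : Nat) : Int) ≠ 0) ↔ x.testBit k = true := by
  rw [Ne, pvBand_eq_zero]
  constructor
  · intro hne
    by_contra hk
    apply hne
    intro j ⟨ha, hb⟩
    rw [Nat.testBit_two_pow] at hb
    have : k = j := by simpa using hb
    subst this; exact hk ha
  · intro hk hall
    exact hall k ⟨hk, by simp⟩

theorem pvOne_shl (k : Nat) : (1 : Int) <<< k = ((2 ^ k : Nat) : Int) := by
  have : ((1 : Nat) : Int) <<< k = (((1 <<< k : Nat)) : Int) := (Int.natCast_shiftLeft 1 k).symm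
  simpa [Nat.shiftLeft_eq] using this

theorem pvBand_pow' (x : Int) (k : Nat) :
    (PySem.Int.band ((1 : Int) <<< k) x ≠ 0) ↔ x.testBit k = true := by
  rw [pvOne_shl, PySem.Int.band_comm]
  exact pvBand_pow x k

-- A's loop is the conjunction of a per-seat check
def pvOkA (bit : Int) (fbit : Int) (i : Int) : Bool :=
  if PySem.Int.band ((1 : Int) <<< i.toNat) fbit ≠ 0 then
    if i > 0 ∧ PySem.Int.band ((1 : Int) <<< (i - 1).toNat) bit ≠ 0 then false
    else if PySem.Int.band ((1 : Int) <<< (i + 1).toNat) bit ≠ 0 then false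
    else true
  else true

theorem pvLoop_eq_all (bit : Int) (fbit : Int) :
    ∀ (n : Nat) (i : Int),
      bitsCheckLoop bit fbit i n = (PySem.List.pyRange i (i + n) 1).all (pvOkA bit fbit) := by
  intro n
  induction n with
  | zero =>
    intro i
    rw [PySem.List.pyRange_one_eq_nil (by omega)]
    rfl
  | succ n ih =>
    intro i
    have he : i + ((n + 1 : Nat) : Int) = (i + 1) + (n : Int) := by push_cast; ring
    rw [he, PySem.List.pyRange_one_cons (by omega : i < (i + 1) + (n : Int)), List.all_cons,
      ← ih (i + 1), bitsCheckLoop]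
    by_cases h1 : PySem.Int.band ((1 : Int) <<< i.toNat) fbit ≠ 0 <;>
      by_cases h2 : i > 0 ∧ PySem.Int.band ((1 : Int) <<< (i - 1).toNat) bit ≠ 0 <;>
        by_cases h3 : PySem.Int.band ((1 : Int) <<< (i + 1).toNat) bit ≠ 0 <;>
          simp [pvOkA, h1, h2, h3]

-- per-seat check at a nonnegative index, in terms of testBit
theorem pvOkA_cast (bit : Int) (fbit : Int) (k : Nat) :
    pvOkA bit fbit ((k : Int)) = true ↔
      (fbit.testBit k = true → (1 ≤ k → bit.testBit (k - 1) = false) ∧ bit.testBit (k + 1) = false) := by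
  have e0 : ((k : Int)).toNat = k := Int.toNat_natCast k
  have e1 : (((k : Int)) + 1).toNat = k + 1 := by omega
  by_cases hk : 1 ≤ k
  · have e2 : (((k : Int)) - 1).toNat = k - 1 := by omega
    have hpos : ((k : Int)) > 0 := by exact_mod_cast hk
    simp only [pvOkA, e0, e1, e2, pvBand_pow', hpos, true_and]
    by_cases hf : fbit.testBit k = true <;>
      by_cases hl : bit.testBit (k - 1) = true <;>
        by_cases hr : bit.testBit (k + 1) = true <;>
          simp_all
  · have hk0 : k = 0 := by omega
    subst hk0
    have hpos : ¬ (((0 : Nat) : Int) > 0) := by omega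
    simp only [pvOkA, e0, e1, pvBand_pow', hpos, false_and, if_false]
    by_cases hf : fbit.testBit 0 = true <;>
      by_cases hr : bit.testBit 1 = true <;>
        simp_all
-- note: in the k = 0 branch the `i > 0` conjunct is false, so the (i-1) band is never consulted

-- the propositional core of A
theorem pvA_iff (bit : Int) (fbit : Int) (width : Int) :
    bits_check bit fbit width = true ↔
      ∀ k : Nat, k < width.toNat →
        (fbit.testBit k = true → (1 ≤ k → bit.testBit (k - 1) = false) ∧ bit.testBit (k + 1) = false) := by
  unfold bits_check
  rw [pvLoop_eq_all bit fbit width.toNat 0, zero_add, PySem.List.pyRange_one]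
  simp only [Int.sub_zero, List.all_map, List.all_eq_true, Function.comp_apply, zero_add,
    List.mem_range]
  constructor
  · intro h k hk
    exact (pvOkA_cast bit fbit k).mp (h k hk)
  · intro h k hk
    exact (pvOkA_cast bit fbit k).mpr (h k hk)

-- proof-side view of B: the masked test, with the capped width as an explicit argument
def pvMasked (bit : Int) (fbit : Int) (w : Int) : Bool :=
  decide (PySem.Int.band bit
    (PySem.Int.bor ((PySem.Int.band fbit (((1 : Int) <<< w.toNat) - 1)) <<< (1 : Nat))
                   ((PySem.Int.band fbit (((1 : Int) <<< w.toNat) - 1)) >>> (1 : Nat))) = 0)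

theorem pvAlt_eq (bit : Int) (fbit : Int) (width : Int) :
    bits_check_alt bit fbit width =
      if min width ((max (PySem.Int.bitLength bit) (PySem.Int.bitLength fbit) : Int) + 2) ≤ 0 then true
      else pvMasked bit fbit
        (min width ((max (PySem.Int.bitLength bit) (PySem.Int.bitLength fbit) : Int) + 2)) := rfl

-- the propositional core of the masked test
theorem pvMask_iff (bit : Int) (fbit : Int) (w : Int) :
    pvMasked bit fbit w = true ↔
      ∀ j : Nat, ¬(bit.testBit j = true ∧
        ((1 ≤ j ∧ (fbit.testBit (j - 1) = true ∧ j - 1 < w.toNat)) ∨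
         (fbit.testBit (1 + j) = true ∧ 1 + j < w.toNat))) := by
  obtain ⟨fn, hfe, hft⟩ := pvBand_nat fbit (2 ^ w.toNat - 1)
  have hmask : (((1 : Int) <<< w.toNat) - 1) = ((2 ^ w.toNat - 1 : Nat) : Int) := by
    rw [pvOne_shl]
    have h1 : 1 ≤ 2 ^ w.toNat := Nat.one_le_two_pow
    push_cast [h1]
    ring
  have hfn : ∀ j, fn.testBit j = (fbit.testBit j && decide (j < w.toNat)) := by
    intro j; rw [hft j, Nat.testBit_two_pow_sub_one]
  have hshl : ((fn : Int)) <<< (1 : Nat) = ((fn <<< 1 : Nat) : Int) := (Int.natCast_shiftLeft fn 1).symm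
  have hshr : ((fn : Int)) >>> (1 : Nat) = ((fn >>> 1 : Nat) : Int) := (Int.natCast_shiftRight fn 1).symm
  unfold pvMasked
  simp only [hmask, hfe, hshl, hshr, PySem.Int.bor_natCast, decide_eq_true_eq]
  rw [pvBand_eq_zero]
  have hgt : ∀ j, ((fn <<< 1) ||| (fn >>> 1)).testBit j =
      ((decide (1 ≤ j) && fn.testBit (j - 1)) || fn.testBit (1 + j)) := by
    intro j
    rw [Nat.testBit_or, Nat.testBit_shiftLeft, Nat.testBit_shiftRight]
  constructor
  · intro h j ⟨hb, hc⟩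
    apply h j
    refine ⟨hb, ?_⟩
    rw [hgt j]
    rcases hc with ⟨h1, hf, hlt⟩ | ⟨hf, hlt⟩
    · simp [hfn, h1, hf, hlt]
    · simp [hfn, hf, hlt]
  · intro h j ⟨hb, hc⟩
    apply h j
    refine ⟨hb, ?_⟩
    rw [hgt j] at hc
    rcases Bool.or_eq_true_iff.mp hc with hl | hr
    · obtain ⟨h1, h2⟩ := Bool.and_eq_true_iff.mp hl
      rw [hfn] at h2
      obtain ⟨h3, h4⟩ := Bool.and_eq_true_iff.mp h2
      exact Or.inl ⟨by simpa using h1, h3, by simpa using h4⟩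
    · rw [hfn] at hr
      obtain ⟨h3, h4⟩ := Bool.and_eq_true_iff.mp hr
      exact Or.inr ⟨h3, by simpa using h4⟩

-- above its bit_length, an integer's two's-complement bits are all copies of its sign
theorem pvTb_high (x : Int) (j : Nat) (h : PySem.Int.bitLength x ≤ j) :
    x.testBit j = decide (x < 0) := by
  have hlt : x.natAbs < 2 ^ PySem.Int.bitLength x := PySem.Int.lt_two_pow_bitLength x
  have hle : (2 : Nat) ^ PySem.Int.bitLength x ≤ 2 ^ j := Nat.pow_le_pow_right (by norm_num) h
  rcases x with m | m
  · have hm : m < 2 ^ j := lt_of_lt_of_le (by simpa using hlt) hle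
    have he : Int.testBit (Int.ofNat m) j = m.testBit j := rfl
    rw [he, Nat.testBit_eq_false_of_lt hm]
    simp
  · have hm : m < 2 ^ j := by
      have h1 : m + 1 < 2 ^ PySem.Int.bitLength (Int.negSucc m) := by
        simpa [Int.natAbs_negSucc] using hlt
      omega
    have he : Int.testBit (Int.negSucc m) j = !(m.testBit j) := rfl
    rw [he, Nat.testBit_eq_false_of_lt hm]
    simp [Int.negSucc_lt_zero]

-- capping the width at the highest relevant bit position does not change A's condition
theorem pvCap (bit : Int) (fbit : Int) (width : Int) (hw : ¬ width ≤ 0) :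
    (∀ k : Nat, k < width.toNat →
        (fbit.testBit k = true → (1 ≤ k → bit.testBit (k - 1) = false) ∧ bit.testBit (k + 1) = false)) ↔
    (∀ k : Nat, k < (min width ((max (PySem.Int.bitLength bit) (PySem.Int.bitLength fbit) : Int) + 2)).toNat →
        (fbit.testBit k = true → (1 ≤ k → bit.testBit (k - 1) = false) ∧ bit.testBit (k + 1) = false)) := by
  have hb1 : PySem.Int.bitLength bit ≤ max (PySem.Int.bitLength bit) (PySem.Int.bitLength fbit) :=
    le_max_left _ _
  have hf1 : PySem.Int.bitLength fbit ≤ max (PySem.Int.bitLength bit) (PySem.Int.bitLength fbit) :=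
    le_max_right _ _
  constructor
  · intro h k hk
    exact h k (by omega)
  · intro h k hk hf
    by_cases hk2 : k < (min width ((max (PySem.Int.bitLength bit) (PySem.Int.bitLength fbit) : Int) + 2)).toNat
    · exact h k hk2 hf
    · have hfneg : fbit < 0 := by
        have ht := pvTb_high fbit k (by omega)
        rw [ht] at hf
        exact of_decide_eq_true hf
      by_cases hbneg : bit < 0
      · exfalso
        set L := max (PySem.Int.bitLength bit) (PySem.Int.bitLength fbit) with hL
        have h1 := h (L + 1) (by omega)
        have hf2 : fbit.testBit (L + 1) = true := by
          rw [pvTb_high fbit (L + 1) (by omega)]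
          simpa using hfneg
        have hb2 : bit.testBit (L + 1 + 1) = true := by
          rw [pvTb_high bit (L + 1 + 1) (by omega)]
          simpa using hbneg
        have h2 := (h1 hf2).2
        rw [h2] at hb2
        exact Bool.false_ne_true hb2
      · refine ⟨fun _ => ?_, ?_⟩
        · rw [pvTb_high bit (k - 1) (by omega)]
          simp [hbneg]
        · rw [pvTb_high bit (k + 1) (by omega)]
          simp [hbneg]

-- ===== VERDICT (by name: the statement is the Claim_ definition above) =====
theorem bits_check_spec : Claim_equal_bits_check := by
  intro bit fbit width _
  unfold Spec_bits_check
  rw [pvAlt_eq]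
  by_cases hw : width ≤ 0
  · have hmin : min width ((max (PySem.Int.bitLength bit) (PySem.Int.bitLength fbit) : Int) + 2) ≤ 0 := by
      omega
    rw [if_pos hmin]
    unfold bits_check
    have h0 : width.toNat = 0 := by omega
    rw [h0]
    rfl
  · have hmin : ¬ (min width ((max (PySem.Int.bitLength bit) (PySem.Int.bitLength fbit) : Int) + 2) ≤ 0) := by
      omega
    rw [if_neg hmin, Bool.eq_iff_iff, pvA_iff, pvCap bit fbit width hw, pvMask_iff]
    set wn := (min width ((max (PySem.Int.bitLength bit) (PySem.Int.bitLength fbit) : Int) + 2)).toNat with hwn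
    constructor
    · intro hPA j ⟨hbj, hc⟩
      rcases hc with ⟨h1, hf, hlt⟩ | ⟨hf, hlt⟩
      · have h := (hPA (j - 1) hlt hf).2
        rw [Nat.sub_add_cancel h1] at h
        rw [h] at hbj
        exact Bool.false_ne_true hbj
      · have h := (hPA (1 + j) hlt hf).1 (by omega)
        have e : 1 + j - 1 = j := by omega
        rw [e] at h
        rw [h] at hbj
        exact Bool.false_ne_true hbj
    · intro hPB k hk hf
      constructor
      · intro h1
        by_contra hbit
        rw [Bool.not_eq_false] at hbit
        apply hPB (k - 1)
        refine ⟨hbit, Or.inr ⟨?_, by omega⟩⟩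
        have e : 1 + (k - 1) = k := by omega
        rw [e]; exact hf
      · by_contra hbit
        rw [Bool.not_eq_false] at hbit
        apply hPB (k + 1)
        refine ⟨hbit, Or.inl ⟨by omega, ?_, by omega⟩⟩
        have e : k + 1 - 1 = k := by omega
        rw [e]; exact hf
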